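-- pv_equiv track=rewrite | github.com/Vincent-chao-lang/ai-governance-platform-v2_1 | app/governance/risk_engine.py | score_risks
-- ===== SOURCE A (Python) =====
-- from typing import Dict, Tuple
--
-- SEVERITY_SCORE = {"low": 10, "med": 30, "high": 70}
--
-- def score_risks(risk_flags: Dict[str, dict]) -> Tuple[int, str]:
--     if not risk_flags:
--         return 0, "none"
--     score = 0
--     worst = "low"
--     for _, meta in risk_flags.items():
--         sev = meta.get("severity", "low")
--         score = max(score, SEVERITY_SCORE.get(sev, 10))
--         if SEVERITY_SCORE.get(sev, 10) > SEVERITY_SCORE.get(worst, 10):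
--             worst = sev
--     return score, worst
-- ===== SOURCE B (Python) =====
-- SEVERITY_SCORE = {"low": 10, "med": 30, "high": 70}
--
--
-- def score_risks(risk_flags):
--     if not risk_flags:
--         return 0, "none"
--     sevs = [m.get("severity", "low") for m in risk_flags.values()]
--     if "high" in sevs:
--         return 70, "high"
--     if "med" in sevs:
--         return 30, "med"
--     return 10, "low"
-- ===== Notes on version B (the rewrite author's own statement) =====
-- stated objective: simpler
-- what changed: Replaced A's running max/worst accumulator loop by a categorical decision: since the severity table has only three fixed levels, B collects the severities once and answers by two membership tests ('high' present -> (70,'high'), else 'med' present -> (30,'med'), else (10,'low')), keeping A's guard for empty input.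
import Mathlib
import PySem

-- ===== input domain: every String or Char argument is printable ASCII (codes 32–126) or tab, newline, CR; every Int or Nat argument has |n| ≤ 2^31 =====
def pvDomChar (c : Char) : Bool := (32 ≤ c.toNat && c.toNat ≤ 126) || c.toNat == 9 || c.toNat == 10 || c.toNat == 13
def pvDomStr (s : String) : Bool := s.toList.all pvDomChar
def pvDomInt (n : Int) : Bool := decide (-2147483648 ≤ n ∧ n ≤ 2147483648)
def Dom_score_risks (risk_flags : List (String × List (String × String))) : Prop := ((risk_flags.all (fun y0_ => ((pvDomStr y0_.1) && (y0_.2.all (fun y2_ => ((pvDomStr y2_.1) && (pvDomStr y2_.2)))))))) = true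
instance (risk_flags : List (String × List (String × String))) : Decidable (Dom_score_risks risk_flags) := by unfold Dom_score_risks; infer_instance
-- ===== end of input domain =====

-- B replaces A's running max/worst accumulator loop by two membership tests over the
-- collected severities (the table has only three fixed levels); simpler, same cost.

-- ===== PORT A =====
def SEVERITY_SCORE : PySem.Dict String Int := PySem.Dict.mk [("low", 10), ("med", 30), ("high", 70)]

-- meta.get("severity", "low")
def sevOf (m : List (String × String)) : String := PySem.Dict.getD (PySem.Dict.mk m) "severity" "low"

-- SEVERITY_SCORE.get(s, 10)
def sevScore (s : String) : Int := PySem.Dict.getD SEVERITY_SCORE s 10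

def score_risks (risk_flags : List (String × List (String × String))) : Int × String :=
  if risk_flags = [] then (0, "none")
  else
    risk_flags.foldl
      (fun st kv =>
        let sev := sevOf kv.2
        let score := max st.1 (sevScore sev)
        let worst := if sevScore sev > sevScore st.2 then sev else st.2
        (score, worst))
      ((0 : Int), "low")

-- ===== PORT B =====
def score_risks_alt (risk_flags : List (String × List (String × String))) : Int × String :=
  if risk_flags = [] then (0, "none")
  else
    let sevs := risk_flags.map (fun kv => sevOf kv.2)
    if sevs.contains "high" then (70, "high")
    else if sevs.contains "med" then (30, "med")
    else (10, "low")

-- ===== PRECONDITION & SPEC =====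
def Spec_score_risks (risk_flags : List (String × List (String × String))) (out : Int × String) : Prop := out = score_risks_alt risk_flags
instance (risk_flags : List (String × List (String × String))) (out : Int × String) : Decidable (Spec_score_risks risk_flags out) := by unfold Spec_score_risks; infer_instance

-- ===== CLAIM (what is proved, stated in full; the proofs are below) =====
def Claim_equal_score_risks : Prop := ∀ (risk_flags : List (String × List (String × String))), Dom_score_risks risk_flags → Spec_score_risks risk_flags (score_risks risk_flags)

-- ===== LEMMAS AND PROOFS =====

theorem contains_cons_ne (l : List String) (y x : String) (h : ¬ y = x) :
    (y :: l).contains x = l.contains x := by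
  simp [h, eq_comm]

theorem contains_cons_self (l : List String) (y x : String) (h : y = x) :
    (y :: l).contains x = true := by
  simp [h]

theorem sevScore_eq (s : String) :
    sevScore s = if s = "high" then 70 else if s = "med" then 30 else 10 := by
  unfold sevScore SEVERITY_SCORE
  by_cases h1 : s = "high"
  · simp_all [PySem.Dict.getD, PySem.Dict.get?, List.find?]
  · by_cases h2 : s = "med"
    · simp_all [PySem.Dict.getD, PySem.Dict.get?, List.find?, eq_comm]
    · by_cases h3 : s = "low"
      · simp_all [PySem.Dict.getD, PySem.Dict.get?, List.find?, eq_comm]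
      · have e1 : ("low" == s) = false :=
          beq_eq_false_iff_ne.mpr (fun he : "low" = s => h3 he.symm)
        have e2 : ("med" == s) = false :=
          beq_eq_false_iff_ne.mpr (fun he : "med" = s => h2 he.symm)
        have e3 : ("high" == s) = false :=
          beq_eq_false_iff_ne.mpr (fun he : "high" = s => h1 he.symm)
        simp [PySem.Dict.getD, PySem.Dict.get?, List.find?, e1, e2, e3, h1, h2]

-- A's loop step
def stepA (st : Int × String) (kv : String × List (String × String)) : Int × String :=
  let sev := sevOf kv.2
  let score := max st.1 (sevScore sev)
  let worst := if sevScore sev > sevScore st.2 then sev else st.2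
  (score, worst)

theorem foldA_high (l : List (String × List (String × String))) :
    l.foldl stepA (70, "high") = (70, "high") := by
  induction l with
  | nil => rfl
  | cons a t ih =>
    have : stepA (70, "high") a = (70, "high") := by
      simp only [stepA, sevScore_eq]
      split_ifs <;> simp_all
    simp [this, ih]

theorem foldA_med (l : List (String × List (String × String))) :
    l.foldl stepA (30, "med") =
      if (l.map (fun kv => sevOf kv.2)).contains "high" then (70, "high") else (30, "med") := by
  induction l with
  | nil => rfl
  | cons a t ih =>
    simp only [List.foldl_cons, List.map_cons]
    by_cases h : sevOf a.2 = "high"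
    · have hstep : stepA (30, "med") a = (70, "high") := by
        simp [stepA, h, sevScore_eq]
      rw [hstep, foldA_high]
      simp only [contains_cons_self _ _ _ h]
      simp
    · have hstep : stepA (30, "med") a = (30, "med") := by
        simp only [stepA, sevScore_eq, if_neg h]
        split_ifs <;> simp_all
      rw [hstep, ih]
      simp only [contains_cons_ne _ _ _ h]

theorem foldA_low (l : List (String × List (String × String))) :
    l.foldl stepA (10, "low") =
      if (l.map (fun kv => sevOf kv.2)).contains "high" then (70, "high")
      else if (l.map (fun kv => sevOf kv.2)).contains "med" then (30, "med")
      else (10, "low") := by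
  induction l with
  | nil => rfl
  | cons a t ih =>
    simp only [List.foldl_cons, List.map_cons]
    by_cases h : sevOf a.2 = "high"
    · have hstep : stepA (10, "low") a = (70, "high") := by
        simp [stepA, h, sevScore_eq]
      rw [hstep, foldA_high]
      simp only [contains_cons_self _ _ _ h]
      simp
    · by_cases hm : sevOf a.2 = "med"
      · have hstep : stepA (10, "low") a = (30, "med") := by
          simp [stepA, hm, sevScore_eq]
        rw [hstep, foldA_med]
        simp only [contains_cons_ne _ _ _ h, contains_cons_self _ _ _ hm]
        by_cases hH : (t.map (fun kv => sevOf kv.2)).contains "high" <;> simp [hH]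
      · have hstep : stepA (10, "low") a = (10, "low") := by
          simp only [stepA, sevScore_eq, if_neg h, if_neg hm]
          split_ifs <;> simp_all
        rw [hstep, ih]
        simp only [contains_cons_ne _ _ _ h, contains_cons_ne _ _ _ hm]

-- ===== VERDICT (by name: the statement is the Claim_ definition above) =====
theorem score_risks_spec : Claim_equal_score_risks := by
  intro rf _
  unfold Spec_score_risks score_risks score_risks_alt
  cases rf with
  | nil => simp
  | cons a t =>
    simp only [reduceCtorEq, if_false, List.map_cons]
    show (a :: t).foldl stepA ((0 : Int), "low") = _
    simp only [List.foldl_cons]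
    by_cases h : sevOf a.2 = "high"
    · have hstep : stepA ((0 : Int), "low") a = (70, "high") := by
        simp [stepA, h, sevScore_eq]
      rw [hstep, foldA_high]
      simp only [contains_cons_self _ _ _ h]
      simp
    · by_cases hm : sevOf a.2 = "med"
      · have hstep : stepA ((0 : Int), "low") a = (30, "med") := by
          simp [stepA, hm, sevScore_eq]
        rw [hstep, foldA_med]
        simp only [contains_cons_ne _ _ _ h, contains_cons_self _ _ _ hm]
        by_cases hH : (t.map (fun kv => sevOf kv.2)).contains "high" <;> simp [hH]
      · have hstep : stepA ((0 : Int), "low") a = (10, "low") := by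
          simp only [stepA, sevScore_eq, if_neg h, if_neg hm]
          split_ifs <;> simp_all
        rw [hstep, foldA_low]
        simp only [contains_cons_ne _ _ _ h, contains_cons_ne _ _ _ hm]
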